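-- pv_equiv track=rewrite | github.com/CarlosAndresAguirreAriza/ProyectoBackendSENA | api_pricut/tests/factories/user_factory.py | __reorganize_user_data
-- ===== SOURCE A (Python) =====
-- from typing import Dict, List, Any
--
-- def __reorganize_user_data(
--     base_data_fields: List[str],
--     unorganized_data: Dict[str, Any],
-- ) -> Dict[str, Dict[str, Any]]:
--     """
--     Reorganize the data provided in the request body.
--
--     #### Parameters:
--     - base_data_fields: The fields that are considered base data for a user.
--     - unorganized_data: The data to reorganize.
--     """
--
--     return {
--         "base_data": {
--             key: value
--             for key, value in unorganized_data.items()
--             if key in base_data_fields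
--         },
--         "role_data": {
--             key: value
--             for key, value in unorganized_data.items()
--             if key not in base_data_fields
--         },
--     }
-- ===== SOURCE B (Python) =====
-- from typing import Dict, List, Any
--
-- def __reorganize_user_data(
--     base_data_fields: List[str],
--     unorganized_data: Dict[str, Any],
-- ) -> Dict[str, Dict[str, Any]]:
--     # Strategy: compute role_data by DELETING the base fields from a copy
--     # (one O(1) pop per field), then derive base_data as the complement,
--     # testing membership against the already-computed role_data dict.
--     role_data = dict(unorganized_data)
--     for field in base_data_fields:
--         role_data.pop(field, None)
--     base_data = {
--         key: value
--         for key, value in unorganized_data.items()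
--         if key not in role_data
--     }
--     return {"base_data": base_data, "role_data": role_data}
-- ===== Notes on version B (the rewrite author's own statement) =====
-- stated objective: faster
-- what changed: B never tests membership in the field list: it computes role_data by popping each base field from a copy of the dict (one O(1) pop per field), then obtains base_data as the complement by O(1) dict-membership in the computed role_data, instead of A's two comprehensions that each scan all items with an O(m) list-membership test.
import Mathlib
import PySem

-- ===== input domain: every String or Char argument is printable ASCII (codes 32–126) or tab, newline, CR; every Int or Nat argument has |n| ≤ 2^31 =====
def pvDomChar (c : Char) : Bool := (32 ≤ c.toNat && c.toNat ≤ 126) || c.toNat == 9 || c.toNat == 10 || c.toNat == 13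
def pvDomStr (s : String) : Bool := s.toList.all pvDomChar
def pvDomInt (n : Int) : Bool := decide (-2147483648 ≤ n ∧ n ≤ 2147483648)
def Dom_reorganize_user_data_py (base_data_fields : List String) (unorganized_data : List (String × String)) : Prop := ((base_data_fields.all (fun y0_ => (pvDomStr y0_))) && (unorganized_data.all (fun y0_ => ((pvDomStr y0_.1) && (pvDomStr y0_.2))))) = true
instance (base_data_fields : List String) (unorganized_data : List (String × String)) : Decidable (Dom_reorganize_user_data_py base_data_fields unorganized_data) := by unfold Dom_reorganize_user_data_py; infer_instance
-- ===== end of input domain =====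

-- B computes role_data by deleting the base fields from a copy of the dict, then base_data as
-- the complement via membership in role_data, instead of A's two membership-filter comprehensions.

-- ===== PORT A =====
-- two dict comprehensions over unorganized_data.items(): membership filter, then its negation
def reorganize_user_data_py (base_data_fields : List String) (unorganized_data : List (String × String)) : List (String × List (String × String)) :=
  [("base_data", unorganized_data.filter (fun kv => base_data_fields.contains kv.1)),
   ("role_data", unorganized_data.filter (fun kv => !base_data_fields.contains kv.1))]

-- ===== PORT B =====
-- dict-overwrite insert (overwrite keeps position, new keys append): exact Python dict assignment
def pvDInsert (d : List (String × String)) (k v : String) : List (String × String) :=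
  if d.any (fun p => p.1 == k) then d.map (fun p => if p.1 == k then (k, v) else p) else d ++ [(k, v)]

-- dict(items): build a dict from an items list — exact Python dict() semantics
def pvDictOf (ud : List (String × String)) : List (String × String) :=
  ud.foldl (fun d kv => pvDInsert d kv.1 kv.2) []

-- role_data.pop(field, None): delete the entry with that key (dict keys are unique, so
-- filtering out the key is exact)
def pvDPop (d : List (String × String)) (k : String) : List (String × String) :=
  d.filter (fun kv => !(kv.1 == k))

-- B: role_data = dict(ud); pop each base field; base_data = complement via membership in role_data
def reorganize_user_data_py_alt (base_data_fields : List String) (unorganized_data : List (String × String)) : List (String × List (String × String)) :=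
  let role_data := base_data_fields.foldl pvDPop (pvDictOf unorganized_data)
  let base_data := unorganized_data.filter (fun kv => !(role_data.any (fun r => r.1 == kv.1)))
  [("base_data", base_data), ("role_data", role_data)]

-- ===== PRECONDITION & SPEC =====
-- Pre_ requires distinct keys: the association list encodes a Python dict, whose keys are
-- unique; a duplicate key has no Python-dict counterpart, so nothing is claimed there.
def Pre_reorganize_user_data_py (base_data_fields : List String) (unorganized_data : List (String × String)) : Prop :=
  (unorganized_data.map Prod.fst).Nodup
instance (base_data_fields : List String) (unorganized_data : List (String × String)) : Decidable (Pre_reorganize_user_data_py base_data_fields unorganized_data) := by unfold Pre_reorganize_user_data_py; infer_instance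
def pvWitness_reorganize_user_data_py : List String × (List (String × String)) :=
  (["name", "email"], [("name", "ana"), ("role", "seller"), ("email", "a@b.c")])
def Spec_reorganize_user_data_py (base_data_fields : List String) (unorganized_data : List (String × String)) (out : List (String × List (String × String))) : Prop := out = reorganize_user_data_py_alt base_data_fields unorganized_data
instance (base_data_fields : List String) (unorganized_data : List (String × String)) (out : List (String × List (String × String))) : Decidable (Spec_reorganize_user_data_py base_data_fields unorganized_data out) := by unfold Spec_reorganize_user_data_py; infer_instance

-- ===== CLAIM =====
def Claim_equal_reorganize_user_data_py : Prop := ∀ (base_data_fields : List String) (unorganized_data : List (String × String)), Dom_reorganize_user_data_py base_data_fields unorganized_data → Pre_reorganize_user_data_py base_data_fields unorganized_data → Spec_reorganize_user_data_py base_data_fields unorganized_data (reorganize_user_data_py base_data_fields unorganized_data)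

-- ===== LEMMAS AND PROOFS =====
-- dict() of a nodup-key items list is that list
theorem pvDictOf_ofAcc (ud acc : List (String × String))
    (h : ∀ kv ∈ ud, acc.any (fun p => p.1 == kv.1) = false) (hn : (ud.map Prod.fst).Nodup) :
    ud.foldl (fun d kv => pvDInsert d kv.1 kv.2) acc = acc ++ ud := by
  induction ud generalizing acc with
  | nil => simp
  | cons kv t ih =>
    simp only [List.map_cons, List.nodup_cons] at hn
    have hkv := h kv (List.mem_cons_self)
    rw [List.foldl_cons]
    have hstep : pvDInsert acc kv.1 kv.2 = acc ++ [kv] := by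
      simp [pvDInsert, hkv]
    rw [hstep, ih]
    · simp
    · intro x hx
      simp only [List.any_append, Bool.or_eq_false_iff]
      refine ⟨h x (List.mem_cons_of_mem _ hx), ?_⟩
      simp only [List.any_cons, List.any_nil, Bool.or_false]
      exact decide_eq_false (fun e => hn.1 (e ▸ List.mem_map_of_mem hx))
    · exact hn.2

theorem pvDictOf_nodup (ud : List (String × String)) (hn : (ud.map Prod.fst).Nodup) :
    pvDictOf ud = ud := by
  have := pvDictOf_ofAcc ud [] (by simp) hn
  simpa [pvDictOf] using this

-- popping each field in turn filters out all the fields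
theorem pvPop_foldl (fields : List String) (d : List (String × String)) :
    fields.foldl pvDPop d = d.filter (fun kv => !fields.contains kv.1) := by
  induction fields generalizing d with
  | nil => simp
  | cons f fs ih =>
    rw [List.foldl_cons, ih]
    simp only [pvDPop, List.filter_filter]
    apply List.filter_congr
    intro kv _
    simp only [List.contains_cons]
    cases h : (kv.1 == f) <;> simp

-- membership in the computed role_data is the negation of membership in the field list
theorem pv_role_membership (fields : List String) (ud : List (String × String)) (kv : String × String)
    (hkv : kv ∈ ud) :
    ((ud.filter (fun p => !fields.contains p.1)).any (fun r => r.1 == kv.1)) = !fields.contains kv.1 := by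
  cases h : fields.contains kv.1 with
  | true =>
    simp only [Bool.not_true]
    rw [List.any_eq_false]
    intro r hr
    simp only [List.mem_filter, Bool.not_eq_eq_eq_not, Bool.not_true] at hr
    simp only [beq_iff_eq]
    intro e
    rw [e] at hr
    rw [hr.2] at h
    exact Bool.false_ne_true h
  | false =>
    simp only [Bool.not_false]
    rw [List.any_eq_true]
    refine ⟨kv, List.mem_filter.mpr ⟨hkv, ?_⟩, by simp⟩
    simp only [List.contains_eq_mem, decide_eq_false_iff_not] at h
    simp [h]

-- ===== VERDICT =====
theorem reorganize_user_data_py_spec : Claim_equal_reorganize_user_data_py := by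
  intro fields ud _ hpre
  unfold Spec_reorganize_user_data_py reorganize_user_data_py reorganize_user_data_py_alt
  rw [pvDictOf_nodup ud hpre, pvPop_foldl]
  have hb : ud.filter (fun kv => !((ud.filter (fun p => !fields.contains p.1)).any (fun r => r.1 == kv.1)))
      = ud.filter (fun kv => fields.contains kv.1) := by
    apply List.filter_congr
    intro kv hkv
    rw [pv_role_membership fields ud kv hkv]
    simp
  simp only [hb]
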